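-- pv_equiv track=rewrite | github.com/KoushalParakala/Genomelab-Backend | app/services/mutation_engine.py | apply_mutation
-- ===== SOURCE A (Python) =====
-- def apply_mutation(sequence: str, mutation_type: str, position: int, new_nucleotide: str = None) -> str:
--     """
--     Applies a biological mutation to a given DNA sequence (Requirement #2).
--     Validates that the specified position exists.
--     """
--     seq_list = list(sequence.upper())
--
--     # Position validation (Requirement #2)
--     if position < 0 or position >= len(seq_list) + (1 if mutation_type == "insertion" else 0):
--         # Specific positioning rules for insertions (can occur at len) vs others
--         if mutation_type == "insertion" and position == len(seq_list):
--             pass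
--         else:
--             raise ValueError(f"Mutation position {position} is out of bounds for sequence length {len(sequence)}.")
--
--     new_nuc = new_nucleotide.upper() if new_nucleotide else None
--
--     if mutation_type == "point":
--         if not new_nuc or len(new_nuc) != 1:
--             raise ValueError("Point mutation (substitution) requires exactly one new_nucleotide.")
--         seq_list[position] = new_nuc
--
--     elif mutation_type == "insertion":
--         if not new_nuc:
--             raise ValueError("Insertion requires a new_nucleotide sequence.")
--         # Insert strings or chars
--         for i, char in enumerate(new_nuc):
--             seq_list.insert(position + i, char)
--
--     elif mutation_type == "deletion":
--         # position + 1 deletion? Requirement says starting at pos.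
--         if position >= len(seq_list):
--              raise ValueError(f"Position {position} out of bounds for deletion.")
--         seq_list.pop(position)
--
--     else:
--         raise ValueError(f"Unknown mutation_type: {mutation_type}")
--
--     return "".join(seq_list)
-- ===== SOURCE B (Python) =====
-- def apply_mutation(sequence: str, mutation_type: str, position: int, new_nucleotide: str = None) -> str:
--     """Single left-to-right pass: emit a per-index edit for every character of
--     the uppercased sequence instead of mutating a char list in place."""
--     if mutation_type not in ("point", "insertion", "deletion"):
--         raise ValueError(f"Unknown mutation_type: {mutation_type}")
--     seq = sequence.upper()
--     nn = new_nucleotide.upper() if new_nucleotide else ""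
--     limit = len(seq) + (1 if mutation_type == "insertion" else 0)
--     if not (0 <= position < limit):
--         raise ValueError(f"Mutation position {position} is out of bounds for sequence length {len(sequence)}.")
--     if mutation_type == "point" and len(nn) != 1:
--         raise ValueError("Point mutation (substitution) requires exactly one new_nucleotide.")
--     if mutation_type == "insertion" and not nn:
--         raise ValueError("Insertion requires a new_nucleotide sequence.")
--     result = []
--     for i, ch in enumerate(seq):
--         if i == position:
--             if mutation_type == "point":
--                 result.append(nn)
--                 continue
--             if mutation_type == "insertion":
--                 result.append(nn)
--             if mutation_type == "deletion":
--                 continue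
--         result.append(ch)
--     if mutation_type == "insertion" and position == len(seq):
--         result.append(nn)
--     return "".join(result)
-- ===== Notes on version B (the rewrite author's own statement) =====
-- stated objective: alternative
-- what changed: B replaces A's in-place char-list mutation (index assignment, per-char insert loop, pop) with a validation-first dispatch followed by a single left-to-right pass that emits a per-index edit for every character, appending the insertion tail when position == len.
import Mathlib
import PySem

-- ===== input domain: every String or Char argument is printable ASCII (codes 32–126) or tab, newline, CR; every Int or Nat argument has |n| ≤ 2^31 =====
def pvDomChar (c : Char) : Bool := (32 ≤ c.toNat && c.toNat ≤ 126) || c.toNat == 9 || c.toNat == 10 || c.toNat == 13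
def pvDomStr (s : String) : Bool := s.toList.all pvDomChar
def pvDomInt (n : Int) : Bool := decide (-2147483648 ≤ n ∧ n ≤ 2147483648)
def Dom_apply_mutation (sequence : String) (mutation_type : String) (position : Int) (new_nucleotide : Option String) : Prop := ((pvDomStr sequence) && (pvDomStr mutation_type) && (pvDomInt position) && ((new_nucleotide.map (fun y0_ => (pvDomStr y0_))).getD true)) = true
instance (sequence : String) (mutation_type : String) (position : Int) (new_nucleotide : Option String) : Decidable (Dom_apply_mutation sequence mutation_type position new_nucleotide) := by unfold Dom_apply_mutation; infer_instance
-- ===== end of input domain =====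

-- B replaces A's in-place char-list mutation (index assignment, per-char insert loop, pop)
-- by a validation-first dispatch and a single pass emitting a per-index edit; objective: alternative.


-- ===== PORT A =====
-- new_nuc = new_nucleotide.upper() if new_nucleotide else None  (empty string is falsy)
def pvNewNuc (new_nucleotide : Option String) : Option (List Char) :=
  match new_nucleotide with
  | some s => if s.toList = [] then none else some (PySem.Chars.upper s.toList)
  | none => none

-- the body after the position-validation block ("raise" is modeled as returning "";
-- every raising input is excluded by Pre_apply_mutation)
def pvABody (seq_list : List Char) (mutation_type : String) (position : Int)
    (new_nucleotide : Option String) : String :=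
  let new_nuc := pvNewNuc new_nucleotide
  if mutation_type = "point" then
    match new_nuc with
    | none => ""                                   -- raise ValueError
    | some nn =>
      if nn.length ≠ 1 then ""                     -- raise ValueError
      else
        -- seq_list[position] = new_nuc ; new_nuc has length 1, so this is its single char
        match PySem.List.pySet? seq_list position (nn.headD ' ') with
        | some l => String.ofList l                -- "".join(seq_list)
        | none => ""                               -- unreachable after validation
  else if mutation_type = "insertion" then
    match new_nuc with
    | none => ""                                   -- raise ValueError
    | some nn =>
      -- for i, char in enumerate(new_nuc): seq_list.insert(position + i, char)
      String.ofList ((PySem.List.enumerate nn 0).foldl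
        (fun acc (pr : Int × Char) => PySem.List.insert acc (position + pr.1) pr.2) seq_list)
  else if mutation_type = "deletion" then
    if position ≥ (seq_list.length : Int) then ""  -- raise ValueError
    else
      match PySem.List.pop? seq_list position with
      | some r => String.ofList r.2                -- seq_list.pop(position)
      | none => ""                                 -- unreachable
  else ""                                          -- raise ValueError (unknown type)

def apply_mutation (sequence : String) (mutation_type : String) (position : Int) (new_nucleotide : Option String) : String :=
  let seq_list := PySem.Chars.upper sequence.toList   -- list(sequence.upper())
  if position < 0 ∨ position ≥ (seq_list.length : Int) + (if mutation_type = "insertion" then (1:Int) else 0) then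
    if mutation_type = "insertion" ∧ position = (seq_list.length : Int) then
      pvABody seq_list mutation_type position new_nucleotide   -- pass: fall through
    else ""                                          -- raise ValueError (out of bounds)
  else
    pvABody seq_list mutation_type position new_nucleotide

-- ===== PORT B =====
-- what the single pass emits at index pr.1 (Python's loop body for one (i, ch))
def pvEmit (mutation_type : String) (position : Int) (nn : List Char) (pr : Int × Char) : List Char :=
  if pr.1 = position then
    if mutation_type = "point" then nn                      -- append nn, continue
    else if mutation_type = "insertion" then nn ++ [pr.2]   -- append nn, then fall through to append ch
    else if mutation_type = "deletion" then []              -- continue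
    else [pr.2]
  else [pr.2]

-- nn = new_nucleotide.upper() if new_nucleotide else ""  (empty string is falsy)
def pvBNn (new_nucleotide : Option String) : List Char :=
  match new_nucleotide with
  | some s => if s.toList = [] then [] else PySem.Chars.upper s.toList
  | none => []

-- the pass (for i, ch in enumerate(seq): result += <edit at i>) and the end-insertion tail
def pvBCore (seq : List Char) (mutation_type : String) (position : Int) (nn : List Char) : List Char :=
  let result := (PySem.List.enumerate seq 0).foldl
    (fun acc pr => acc ++ pvEmit mutation_type position nn pr) ([] : List Char)
  if mutation_type = "insertion" ∧ position = (seq.length : Int) then result ++ nn else result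

def apply_mutation_alt (sequence : String) (mutation_type : String) (position : Int) (new_nucleotide : Option String) : String :=
  if mutation_type ≠ "point" ∧ mutation_type ≠ "insertion" ∧ mutation_type ≠ "deletion" then
    ""                                             -- raise ValueError (unknown type)
  else
    let seq := PySem.Chars.upper sequence.toList   -- seq = sequence.upper()
    let nn := pvBNn new_nucleotide
    let limit : Int := (seq.length : Int) + (if mutation_type = "insertion" then (1:Int) else 0)
    if ¬ (0 ≤ position ∧ position < limit) then "" -- raise ValueError (out of bounds)
    else if mutation_type = "point" ∧ nn.length ≠ 1 then ""      -- raise ValueError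
    else if mutation_type = "insertion" ∧ nn = [] then ""        -- raise ValueError
    else String.ofList (pvBCore seq mutation_type position nn)   -- "".join(result)

-- ===== PRECONDITION & SPEC =====
-- Pre_ excludes exactly the inputs on which A raises ValueError: unknown mutation_type,
-- out-of-range position, and a missing/empty/wrong-length new_nucleotide.
def Pre_apply_mutation (sequence : String) (mutation_type : String) (position : Int) (new_nucleotide : Option String) : Prop :=
  0 ≤ position ∧
  ((mutation_type = "point" ∧ position < (sequence.toList.length : Int) ∧
      (new_nucleotide.map (fun s => s.toList.length)).getD 0 = 1) ∨
   (mutation_type = "insertion" ∧ position ≤ (sequence.toList.length : Int) ∧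
      (new_nucleotide.map (fun s => !s.toList.isEmpty)).getD false = true) ∨
   (mutation_type = "deletion" ∧ position < (sequence.toList.length : Int)))
instance (sequence : String) (mutation_type : String) (position : Int) (new_nucleotide : Option String) : Decidable (Pre_apply_mutation sequence mutation_type position new_nucleotide) := by unfold Pre_apply_mutation; infer_instance

def pvWitness_apply_mutation : String × String × Int × Option String := ("acgt", "point", 2, some "T")

def Spec_apply_mutation (sequence : String) (mutation_type : String) (position : Int) (new_nucleotide : Option String) (out : String) : Prop := out = apply_mutation_alt sequence mutation_type position new_nucleotide
instance (sequence : String) (mutation_type : String) (position : Int) (new_nucleotide : Option String) (out : String) : Decidable (Spec_apply_mutation sequence mutation_type position new_nucleotide out) := by unfold Spec_apply_mutation; infer_instance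

-- ===== CLAIM (what is proved, stated in full; the proofs are below) =====
def Claim_equal_apply_mutation : Prop := ∀ (sequence : String) (mutation_type : String) (position : Int) (new_nucleotide : Option String), Dom_apply_mutation sequence mutation_type position new_nucleotide → Pre_apply_mutation sequence mutation_type position new_nucleotide → Spec_apply_mutation sequence mutation_type position new_nucleotide (apply_mutation sequence mutation_type position new_nucleotide)

-- ===== LEMMAS AND PROOFS =====

theorem length_upper (l : List Char) : (PySem.Chars.upper l).length = l.length := by
  simp [PySem.Chars.upper]

-- A's insertion loop = take/append/drop
theorem insert_loop (nn : List Char) : ∀ (s : Nat) (seq : List Char) (p : Nat),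
    p + s ≤ seq.length →
    (PySem.List.enumerate nn (s : Int)).foldl
        (fun acc (pr : Int × Char) => PySem.List.insert acc ((p : Int) + pr.1) pr.2) seq
      = seq.take (p + s) ++ nn ++ seq.drop (p + s) := by
  induction nn with
  | nil => intro s seq p h; simp [PySem.List.enumerate]
  | cons c nn ih =>
    intro s seq p h
    have hcons : PySem.List.enumerate (c :: nn) (s : Int)
        = ((s : Int), c) :: PySem.List.enumerate nn ((s : Int) + 1) := by
      simp [PySem.List.enumerate]
    rw [hcons]
    simp only [List.foldl_cons]
    have hins : PySem.List.insert seq ((p : Int) + (s : Int)) c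
        = seq.take (p + s) ++ c :: seq.drop (p + s) := by
      have := PySem.List.insert_natCast seq (p + s) c h
      simpa using this
    have hlen : p + (s + 1) ≤ (seq.take (p + s) ++ c :: seq.drop (p + s)).length := by
      simp; omega
    have hrec := ih (s + 1) (seq.take (p + s) ++ c :: seq.drop (p + s)) p hlen
    rw [hins]
    push_cast at hrec ⊢
    rw [hrec]
    have hl : (seq.take (p + s)).length = p + s := by
      simp; omega
    have h1 : (seq.take (p + s) ++ c :: seq.drop (p + s)).take (p + (s + 1))
        = seq.take (p + s) ++ [c] := by
      have : p + (s + 1) = (seq.take (p + s)).length + 1 := by omega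
      rw [this, List.take_length_add_append]
      rfl
    have h2 : (seq.take (p + s) ++ c :: seq.drop (p + s)).drop (p + (s + 1))
        = seq.drop (p + s) := by
      have : p + (s + 1) = (seq.take (p + s)).length + 1 := by omega
      rw [this, List.drop_length_add_append]
      rfl
    rw [h1, h2]
    simp

-- B's pass over a segment the edit index never hits reproduces the segment
theorem pvNoHit (mt : String) (position : Int) (nn : List Char) :
    ∀ (seq : List Char) (s : Nat),
      (position < (s : Int) ∨ (s : Int) + (seq.length : Int) ≤ position) →
      (PySem.List.enumerate seq ((s : Nat) : Int)).flatMap (pvEmit mt position nn) = seq := by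
  intro seq
  induction seq with
  | nil => intro s h; simp [PySem.List.enumerate]
  | cons c tl ih =>
    intro s h
    have hcons : PySem.List.enumerate (c :: tl) ((s : Nat) : Int)
        = (((s : Nat) : Int), c) :: PySem.List.enumerate tl (((s : Nat) : Int) + 1) := by
      simp [PySem.List.enumerate]
    rw [hcons, List.flatMap_cons]
    have hne : ((s : Nat) : Int) ≠ position := by
      simp only [List.length_cons] at h; push_cast at h; omega
    have hemit : pvEmit mt position nn (((s : Nat) : Int), c) = [c] := by
      simp [pvEmit, hne]
    have h' : (PySem.List.enumerate tl (((s + 1 : Nat) : Nat) : Int)).flatMap (pvEmit mt position nn) = tl := by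
      apply ih (s + 1)
      simp only [List.length_cons] at h; push_cast at h ⊢; omega
    have hc : (((s : Nat) : Int) + 1) = (((s + 1 : Nat) : Nat) : Int) := by push_cast; ring
    rw [hemit, hc, h']
    rfl

-- B's full pass splits at the hit index
theorem pvHitSplit (mt : String) (nn : List Char) (seq : List Char) (p : Nat)
    (h : p < seq.length) :
    (PySem.List.enumerate seq 0).flatMap (pvEmit mt ((p : Nat) : Int) nn)
      = seq.take p ++ pvEmit mt ((p : Nat) : Int) nn (((p : Nat) : Int), seq[p]) ++ seq.drop (p + 1) := by
  have hsplit : seq = seq.take p ++ [seq[p]] ++ seq.drop (p + 1) := by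
    conv_lhs => rw [← List.take_append_drop p seq]
    rw [List.drop_eq_getElem_cons h]
    simp
  have hlt : (seq.take p).length = p := by simp; omega
  conv_lhs => rw [hsplit]
  rw [PySem.List.enumerate_append, PySem.List.enumerate_append]
  rw [List.flatMap_append, List.flatMap_append]
  have h1 : (PySem.List.enumerate (seq.take p) 0).flatMap (pvEmit mt ((p : Nat) : Int) nn) = seq.take p := by
    have := pvNoHit mt ((p : Nat) : Int) nn (seq.take p) 0 (by right; rw [hlt]; push_cast; omega)
    simpa using this
  have hmidstart : (0 : Int) + ((seq.take p).length : Int) = ((p : Nat) : Int) := by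
    rw [hlt]; omega
  have h2 : (PySem.List.enumerate [seq[p]] ((0 : Int) + ((seq.take p).length : Int))).flatMap (pvEmit mt ((p : Nat) : Int) nn)
      = pvEmit mt ((p : Nat) : Int) nn (((p : Nat) : Int), seq[p]) := by
    rw [hmidstart]
    simp [PySem.List.enumerate]
  have htailstart : (0 : Int) + (((seq.take p ++ [seq[p]]).length : Nat) : Int)
      = (((p + 1 : Nat) : Nat) : Int) := by
    simp
    omega
  have h3 : (PySem.List.enumerate (seq.drop (p + 1)) ((0 : Int) + (((seq.take p ++ [seq[p]]).length : Nat) : Int))).flatMap (pvEmit mt ((p : Nat) : Int) nn)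
      = seq.drop (p + 1) := by
    rw [htailstart]
    apply pvNoHit
    left; push_cast; omega
  rw [h1, h2, h3]

-- evaluations of pvBCore in the three validated situations
theorem pvBCore_point (seq : List Char) (p : Nat) (nn : List Char) (h : p < seq.length) :
    pvBCore seq "point" ((p : Nat) : Int) nn = seq.take p ++ nn ++ seq.drop (p + 1) := by
  unfold pvBCore
  rw [PySem.List.foldl_append_eq_flatMap, pvHitSplit "point" nn seq p h]
  have hemit : pvEmit "point" ((p : Nat) : Int) nn (((p : Nat) : Int), seq[p]) = nn := by
    simp [pvEmit]
  rw [hemit, if_neg (by rintro ⟨h1, -⟩; exact absurd h1 (by decide))]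
  simp

theorem pvBCore_ins_mid (seq : List Char) (p : Nat) (nn : List Char) (h : p < seq.length) :
    pvBCore seq "insertion" ((p : Nat) : Int) nn = seq.take p ++ nn ++ seq.drop p := by
  unfold pvBCore
  rw [PySem.List.foldl_append_eq_flatMap, pvHitSplit "insertion" nn seq p h]
  have hemit : pvEmit "insertion" ((p : Nat) : Int) nn (((p : Nat) : Int), seq[p])
      = nn ++ [seq[p]] := by
    simp [pvEmit]
  rw [hemit, if_neg (by rintro ⟨-, h2⟩; omega)]
  rw [List.drop_eq_getElem_cons h]
  simp

theorem pvBCore_ins_end (seq : List Char) (nn : List Char) :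
    pvBCore seq "insertion" ((seq.length : Nat) : Int) nn = seq ++ nn := by
  unfold pvBCore
  rw [PySem.List.foldl_append_eq_flatMap]
  have hnohit := pvNoHit "insertion" ((seq.length : Nat) : Int) nn seq 0
    (by right; push_cast; omega)
  simp only [Nat.cast_zero] at hnohit
  rw [hnohit, if_pos ⟨rfl, rfl⟩]
  simp

theorem pvBCore_del (seq : List Char) (p : Nat) (nn : List Char) (h : p < seq.length) :
    pvBCore seq "deletion" ((p : Nat) : Int) nn = seq.take p ++ seq.drop (p + 1) := by
  unfold pvBCore
  rw [PySem.List.foldl_append_eq_flatMap, pvHitSplit "deletion" nn seq p h]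
  have hemit : pvEmit "deletion" ((p : Nat) : Int) nn (((p : Nat) : Int), seq[p]) = [] := by
    simp [pvEmit]
  rw [hemit, if_neg (by rintro ⟨h1, -⟩; exact absurd h1 (by decide))]
  simp

-- A's body = "".join(B's pass), under the validated conditions
theorem bodies_eq (seq : List Char) (mutation_type : String) (position : Int)
    (new_nucleotide : Option String) (hpos : 0 ≤ position)
    (hok : (mutation_type = "point" ∧ position < (seq.length : Int) ∧
              (new_nucleotide.map (fun s => s.toList.length)).getD 0 = 1) ∨
           (mutation_type = "insertion" ∧ position ≤ (seq.length : Int) ∧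
              (new_nucleotide.map (fun s => !s.toList.isEmpty)).getD false = true) ∨
           (mutation_type = "deletion" ∧ position < (seq.length : Int))) :
    pvABody seq mutation_type position new_nucleotide
      = String.ofList (pvBCore seq mutation_type position (pvBNn new_nucleotide)) := by
  obtain ⟨p, rfl⟩ : ∃ p : Nat, position = (p : Int) := ⟨position.toNat, by omega⟩
  rcases hok with ⟨hmt, hp, hnn1⟩ | ⟨hmt, hp, hnne⟩ | ⟨hmt, hp⟩
  · -- point
    have hp' : p < seq.length := by exact_mod_cast hp
    subst hmt
    obtain ⟨s0, rfl⟩ : ∃ s0, new_nucleotide = some s0 := by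
      cases new_nucleotide with
      | none => simp at hnn1
      | some s0 => exact ⟨s0, rfl⟩
    simp only [Option.map_some, Option.getD_some] at hnn1
    have hne : s0.toList ≠ [] := by intro h; rw [h] at hnn1; simp at hnn1
    have hlup : (PySem.Chars.upper s0.toList).length = 1 := by rw [length_upper]; exact hnn1
    obtain ⟨c, hc⟩ := List.length_eq_one_iff.mp hlup
    have hnnB : pvBNn (some s0) = [c] := by
      simp only [pvBNn]; rw [if_neg hne, hc]
    have hnuc : pvNewNuc (some s0) = some (PySem.Chars.upper s0.toList) := by
      simp only [pvNewNuc]; rw [if_neg hne]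
    have hset : PySem.List.pySet? seq ((p : Nat) : Int) c = some (seq.set p c) :=
      PySem.List.pySet?_natCast seq p c hp'
    have hseteq : seq.set p c = seq.take p ++ [c] ++ seq.drop (p + 1) := by
      rw [List.set_eq_take_append_cons_drop, if_pos hp']
      simp
    simp only [pvABody, hnuc, hc, hnnB]
    simp [hset, hseteq, pvBCore_point seq p [c] hp']
  · -- insertion
    have hp' : p ≤ seq.length := by exact_mod_cast hp
    subst hmt
    obtain ⟨s0, rfl⟩ : ∃ s0, new_nucleotide = some s0 := by
      cases new_nucleotide with
      | none => simp at hnne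
      | some s0 => exact ⟨s0, rfl⟩
    simp only [Option.map_some, Option.getD_some, Bool.not_eq_eq_eq_not, Bool.not_true] at hnne
    have hne : s0.toList ≠ [] := by
      intro h; rw [h] at hnne; simp at hnne
    have hnnB : pvBNn (some s0) = PySem.Chars.upper s0.toList := by
      simp only [pvBNn]; rw [if_neg hne]
    have hnuc : pvNewNuc (some s0) = some (PySem.Chars.upper s0.toList) := by
      simp only [pvNewNuc]; rw [if_neg hne]
    have hloop := insert_loop (PySem.Chars.upper s0.toList) 0 seq p (by omega)
    simp only [Nat.add_zero, Nat.cast_zero] at hloop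
    simp only [pvABody, hnuc, hnnB]
    by_cases hpe : p = seq.length
    · subst hpe
      simp [hloop, pvBCore_ins_end]
    · have hplt : p < seq.length := by omega
      simp [hloop, pvBCore_ins_mid seq p _ hplt]
  · -- deletion
    have hp' : p < seq.length := by exact_mod_cast hp
    subst hmt
    have hpop : PySem.List.pop? seq ((p : Nat) : Int) = some (seq[p], seq.eraseIdx p) :=
      PySem.List.pop?_natCast seq p hp'
    have herase : seq.eraseIdx p = seq.take p ++ seq.drop (p + 1) := by
      rw [List.eraseIdx_eq_take_drop_succ]
    have hnotge : ¬ (((p : Nat) : Int) ≥ (seq.length : Int)) := by omega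
    simp only [pvABody]
    simp [hnotge, hpop, herase, pvBCore_del seq p _ hp']

-- ===== VERDICT (by name: the statement is the Claim_ definition above) =====
theorem apply_mutation_spec : Claim_equal_apply_mutation := by
  intro sequence mutation_type position new_nucleotide _hdom hpre
  unfold Spec_apply_mutation
  obtain ⟨hpos, hcase⟩ := hpre
  have hlen : ((PySem.Chars.upper sequence.toList).length : Int) = (sequence.toList.length : Int) := by
    rw [length_upper]
  have hok : (mutation_type = "point" ∧ position < ((PySem.Chars.upper sequence.toList).length : Int) ∧
                (new_nucleotide.map (fun s => s.toList.length)).getD 0 = 1) ∨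
             (mutation_type = "insertion" ∧ position ≤ ((PySem.Chars.upper sequence.toList).length : Int) ∧
                (new_nucleotide.map (fun s => !s.toList.isEmpty)).getD false = true) ∨
             (mutation_type = "deletion" ∧ position < ((PySem.Chars.upper sequence.toList).length : Int)) := by
    rw [hlen]; exact hcase
  have hbody := bodies_eq (PySem.Chars.upper sequence.toList) mutation_type position new_nucleotide hpos hok
  -- A's outer validation does not fire
  have hcond : ¬ (position < 0 ∨ position ≥ ((PySem.Chars.upper sequence.toList).length : Int) + (if mutation_type = "insertion" then (1:Int) else 0)) := by
    rcases hok with ⟨h, h2, -⟩ | ⟨h, h2, -⟩ | ⟨h, h2⟩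
    · rw [h, if_neg (by decide : ¬ ("point" : String) = "insertion")]; omega
    · rw [h, if_pos rfl]; omega
    · rw [h, if_neg (by decide : ¬ ("deletion" : String) = "insertion")]; omega
  -- B's guards do not fire
  have hmt3 : ¬ (mutation_type ≠ "point" ∧ mutation_type ≠ "insertion" ∧ mutation_type ≠ "deletion") := by
    rcases hok with ⟨h, -⟩ | ⟨h, -⟩ | ⟨h, -⟩ <;> simp [h]
  have hbound : ¬ ¬ (0 ≤ position ∧ position < ((PySem.Chars.upper sequence.toList).length : Int) + (if mutation_type = "insertion" then (1:Int) else 0)) := by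
    rcases hok with ⟨h, h2, -⟩ | ⟨h, h2, -⟩ | ⟨h, h2⟩
    · rw [h, if_neg (by decide : ¬ ("point" : String) = "insertion")]; omega
    · rw [h, if_pos rfl]; omega
    · rw [h, if_neg (by decide : ¬ ("deletion" : String) = "insertion")]; omega
  have hpoint : ¬ (mutation_type = "point" ∧ (pvBNn new_nucleotide).length ≠ 1) := by
    rintro ⟨hmt, hl⟩
    rcases hok with ⟨-, -, h1⟩ | ⟨h, -⟩ | ⟨h, -⟩
    · apply hl
      cases new_nucleotide with
      | none => simp at h1
      | some s0 =>
        simp only [Option.map_some, Option.getD_some] at h1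
        have hne : s0.toList ≠ [] := by intro hh; rw [hh] at h1; simp at h1
        simp only [pvBNn, if_neg hne]
        rw [length_upper]; exact h1
    · rw [hmt] at h; exact absurd h (by decide)
    · rw [hmt] at h; exact absurd h (by decide)
  have hins : ¬ (mutation_type = "insertion" ∧ pvBNn new_nucleotide = []) := by
    rintro ⟨hmt, hl⟩
    rcases hok with ⟨h, -⟩ | ⟨-, -, h1⟩ | ⟨h, -⟩
    · rw [hmt] at h; exact absurd h (by decide)
    · cases new_nucleotide with
      | none => simp at h1
      | some s0 =>
        simp only [Option.map_some, Option.getD_some, Bool.not_eq_eq_eq_not, Bool.not_true] at h1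
        have hne : s0.toList ≠ [] := by intro hh; rw [hh] at h1; simp at h1
        simp only [pvBNn, if_neg hne] at hl
        have : (PySem.Chars.upper s0.toList).length = 0 := by rw [hl]; rfl
        rw [length_upper] at this
        exact hne (List.eq_nil_of_length_eq_zero this)
    · rw [hmt] at h; exact absurd h (by decide)
  unfold apply_mutation apply_mutation_alt
  simp only [if_neg hcond, if_neg hmt3, if_neg hbound, if_neg hpoint, if_neg hins]
  exact hbody
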